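-- pv_equiv track=rewrite | github.com/1Timo/Advent-of-code-2021 | 5.uloha.py | procedure_3
-- ===== SOURCE A (Python) =====
-- def procedure_3(num, num_2, enlarge_1, enlarge_2):
--     expand = [num]
--     new = 0
--     while expand[-1] != num_2:
--         helping = expand[new].split()
--         changing_ind = len(helping[0][:helping[0].find(',')])
--         changing_ind_2 = changing_ind + 1
--         first = f'{int(helping[0][:changing_ind]) + (1 if enlarge_1 else -1)}'
--         second = f'{int(helping[0][changing_ind_2:]) + (1 if enlarge_2 else -1)}'
--         full = first + ',' + second
--         expand.append(full)
--         new += 1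
--
--     return expand
-- ===== SOURCE B (Python) =====
-- def procedure_3(num, num_2, enlarge_1, enlarge_2):
--     if num == num_2:
--         return [num]
--
--     def point(s):
--         tok = s.split()[0]
--         j = tok.find(',')
--         return int(tok[:j]), int(tok[j + 1:])
--
--     x0, y0 = point(num)
--     x1, _ = point(num_2)
--     dx = 1 if enlarge_1 else -1
--     dy = 1 if enlarge_2 else -1
--     n = dx * (x1 - x0)
--     return [num] + ['{},{}'.format(x0 + dx * i, y0 + dy * i) for i in range(1, n + 1)]
-- ===== Notes on version B (the rewrite author's own statement) =====
-- stated objective: simpler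
-- what changed: Replaces the termination-checked while-loop that re-splits and re-int-parses the previous point string on every iteration (terminating by string comparison with num_2) with a single up-front parse of num and num_2, a closed-form step count n = dx*(x1-x0), and one list comprehension formatting the points directly.
import Mathlib
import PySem

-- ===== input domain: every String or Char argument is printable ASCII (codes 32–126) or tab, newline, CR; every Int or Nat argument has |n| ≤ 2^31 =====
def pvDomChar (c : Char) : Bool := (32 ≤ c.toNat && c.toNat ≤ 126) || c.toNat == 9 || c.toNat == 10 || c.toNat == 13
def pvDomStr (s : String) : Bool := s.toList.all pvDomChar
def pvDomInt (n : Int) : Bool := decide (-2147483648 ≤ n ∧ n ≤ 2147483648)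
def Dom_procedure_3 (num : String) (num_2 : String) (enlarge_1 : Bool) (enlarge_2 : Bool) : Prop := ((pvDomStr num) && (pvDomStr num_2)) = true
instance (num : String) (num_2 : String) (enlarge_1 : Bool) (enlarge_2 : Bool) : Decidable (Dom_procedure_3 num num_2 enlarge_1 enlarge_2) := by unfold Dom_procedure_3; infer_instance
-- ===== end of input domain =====

-- B replaces A's re-parsing while-loop by a single parse of both endpoint strings, a
-- closed-form step count and one comprehension formatting the points (objective: simpler).

-- ===== PORT A =====
-- shared parse helper (used by Pre_ below and, as a fuel bound, by port A): the result of
-- int-parsing the two halves of the first whitespace token of s around its first comma,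
-- exactly as A's loop body reads a point string; none where Python raises.
def pvParse (s : String) : Option (Int × Int) :=
  match (PySem.Str.split₀ s).head? with
  | none => none
  | some tok =>
    let j := PySem.Str.find tok ","
    if j < 0 then none
    else
      match PySem.Int.ofStr? (PySem.Str.slice tok none (some j)),
            PySem.Int.ofStr? (PySem.Str.slice tok (some (j + 1)) none) with
      | some x, some y => some (x, y)
      | _, _ => none

-- one body of A's while-loop: split, find the comma, re-int-parse both halves, format.
-- The `.getD` defaults totalize Python's IndexError/ValueError (they never fire inside Pre_).
def pvStepA (enlarge_1 enlarge_2 : Bool) (cur : String) : String :=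
  let helping := PySem.Str.split₀ cur
  let h0 := (PySem.List.pyGet? helping 0).getD ""
  let changing_ind := PySem.Str.len (PySem.Str.slice h0 none (some (PySem.Str.find h0 ",")))
  let changing_ind_2 := changing_ind + 1
  let first := PySem.Int.toStr
    ((PySem.Int.ofStr? (PySem.Str.slice h0 none (some changing_ind))).getD 0 +
      (if enlarge_1 then 1 else -1))
  let second := PySem.Int.toStr
    ((PySem.Int.ofStr? (PySem.Str.slice h0 (some changing_ind_2) none)).getD 0 +
      (if enlarge_2 then 1 else -1))
  first ++ "," ++ second

-- A's while-loop; `fuel` only totalizes the recursion (on every input admitted by Pre_ the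
-- loop exits through its own `expand[-1] != num_2` test before fuel runs out).
def pvLoopA (num_2 : String) (e1 e2 : Bool) : List String → Nat → Nat → List String
  | expand, _, 0 => expand
  | expand, new, fuel + 1 =>
    if (PySem.List.pyGet? expand (-1)).getD "" ≠ num_2 then
      pvLoopA num_2 e1 e2
        (expand ++ [pvStepA e1 e2 ((PySem.List.pyGet? expand (new : Int)).getD "")])
        (new + 1) fuel
    else expand

-- fuel bound for the loop, computed from the two endpoint parses (enough for every
-- terminating run; not part of A's algorithm).
def pvFuelA (num num_2 : String) : Nat :=
  match pvParse num, pvParse num_2 with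
  | some p, some q => (q.1 - p.1).natAbs + 1
  | _, _ => 1

def procedure_3 (num : String) (num_2 : String) (enlarge_1 : Bool) (enlarge_2 : Bool) : List String :=
  pvLoopA num_2 enlarge_1 enlarge_2 [num] 0 (pvFuelA num num_2)

-- ===== PORT B =====
-- Source B's `point(s)`: first whitespace token, split at the first comma, int both halves
-- (`.getD` totalizes Python's IndexError/ValueError; they never fire inside Pre_).
def pvPointB (s : String) : Int × Int :=
  let tok := (PySem.List.pyGet? (PySem.Str.split₀ s) 0).getD ""
  let j := PySem.Str.find tok ","
  ((PySem.Int.ofStr? (PySem.Str.slice tok none (some j))).getD 0,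
   (PySem.Int.ofStr? (PySem.Str.slice tok (some (j + 1)) none)).getD 0)

def procedure_3_alt (num : String) (num_2 : String) (enlarge_1 : Bool) (enlarge_2 : Bool) : List String :=
  if num = num_2 then [num]
  else
    let p0 := pvPointB num
    let p1 := pvPointB num_2
    let dx : Int := if enlarge_1 then 1 else -1
    let dy : Int := if enlarge_2 then 1 else -1
    let n := dx * (p1.1 - p0.1)
    [num] ++ (PySem.List.pyRange 1 (n + 1) 1).map (fun i =>
      PySem.Int.toStr (p0.1 + dx * i) ++ "," ++ PySem.Int.toStr (p0.2 + dy * i))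

-- ===== PRECONDITION & SPEC =====
def pvDx (b : Bool) : Int := if b then 1 else -1

-- the canonical string Python's f'{x},{y}' produces — every string A appends has this form
def pvCanon (x y : Int) : String := PySem.Int.toStr x ++ "," ++ PySem.Int.toStr y

-- int(str(m)) = m; true for every integer m (stated because PySem ships no general
-- round-trip lemma: Pre_ records the instances the proof uses, excluding no input)
def pvRT (m : Int) : Bool := PySem.Int.ofStr? (PySem.Int.toStr m) == some m

def pvChainOk (num num_2 : String) (e1 e2 : Bool) : Bool :=
  match pvParse num, pvParse num_2 with
  | some (x0, y0), some (x1, y1) =>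
    let n := pvDx e1 * (x1 - x0)
    decide (num_2 = pvCanon x1 y1) && decide (pvDx e2 * (y1 - y0) = n) && decide (1 ≤ n) &&
    (List.range (n.toNat + 1)).all (fun k =>
      pvRT (x0 + pvDx e1 * k) && pvRT (y0 + pvDx e2 * k))
  | _, _ => false

-- Pre_ is exactly the set of inputs on which A's while-loop terminates without raising:
-- either num already equals num_2, or num's first token parses as a point and num_2 is the
-- canonical string of the point reached from it after n ≥ 1 unit steps in the two flag
-- directions; the round-trip clause inside pvChainOk holds for every integer and excludes
-- no input.  Outside Pre_ Python's A raises or never returns.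
def Pre_procedure_3 (num : String) (num_2 : String) (enlarge_1 : Bool) (enlarge_2 : Bool) : Prop :=
  num = num_2 ∨ pvChainOk num num_2 enlarge_1 enlarge_2 = true

instance (num : String) (num_2 : String) (enlarge_1 : Bool) (enlarge_2 : Bool) : Decidable (Pre_procedure_3 num num_2 enlarge_1 enlarge_2) := by unfold Pre_procedure_3; infer_instance

def pvWitness_procedure_3 : String × String × Bool × Bool := ("0,0", "2,2", true, true)

def Spec_procedure_3 (num : String) (num_2 : String) (enlarge_1 : Bool) (enlarge_2 : Bool) (out : List String) : Prop := out = procedure_3_alt num num_2 enlarge_1 enlarge_2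
instance (num : String) (num_2 : String) (enlarge_1 : Bool) (enlarge_2 : Bool) (out : List String) : Decidable (Spec_procedure_3 num num_2 enlarge_1 enlarge_2 out) := by unfold Spec_procedure_3; infer_instance

-- ===== CLAIM (what is proved, stated in full; the proofs are below) =====
def Claim_equal_procedure_3 : Prop := ∀ (num : String) (num_2 : String) (enlarge_1 : Bool) (enlarge_2 : Bool), Dom_procedure_3 num num_2 enlarge_1 enlarge_2 → Pre_procedure_3 num num_2 enlarge_1 enlarge_2 → Spec_procedure_3 num num_2 enlarge_1 enlarge_2 (procedure_3 num num_2 enlarge_1 enlarge_2)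

-- ===== LEMMAS AND PROOFS =====

theorem pv_canon_toList (x y : Int) :
    (pvCanon x y).toList = PySem.Int.toChars x ++ ',' :: PySem.Int.toChars y := by
  unfold pvCanon
  rw [String.toList_append, String.toList_append]
  simp [PySem.Int.toList_toStr]

theorem pv_digit_toNat {c : Char} (h : c.isDigit = true) : 48 ≤ c.toNat ∧ c.toNat ≤ 57 := by
  simp [Char.isDigit] at h
  exact h

theorem pv_toChars_mem (m : Int) : ∀ c ∈ PySem.Int.toChars m, c.isDigit = true ∨ c = '-' := by
  intro c hc
  unfold PySem.Int.toChars at hc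
  split at hc
  · rcases List.mem_cons.1 hc with h | h
    · right; exact h
    · left; exact Nat.isDigit_of_mem_toDigits (by norm_num) (le_refl _) h
  · left; exact Nat.isDigit_of_mem_toDigits (by norm_num) (le_refl _) hc

theorem pv_isspace_false {c : Char} (h : c.isDigit = true ∨ c = '-') :
    PySem.Chars.isspace c = false := by
  rcases h with h | rfl
  · have := pv_digit_toNat h
    simp [PySem.Chars.isspace]
    omega
  · decide

theorem pv_ne_comma {c : Char} (h : c.isDigit = true ∨ c = '-') : c ≠ ',' := by
  rcases h with h | rfl
  · have := pv_digit_toNat h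
    intro rfl; simp at this
  · decide

theorem pv_comma_not_mem (m : Int) : ¬ (',' ∈ PySem.Int.toChars m) := by
  intro h
  exact pv_ne_comma (pv_toChars_mem m ',' h) rfl

theorem pv_split0_go (cs : List Char) (h : ∀ c ∈ cs, PySem.Chars.isspace c = false) :
    ∀ cur acc, PySem.Chars.split₀.go cs cur acc =
      if (cur.reverse ++ cs).isEmpty then acc.reverse
      else acc.reverse ++ [cur.reverse ++ cs] := by
  induction cs with
  | nil =>
    intro cur acc
    rcases Decidable.em (cur = []) with hcur | hcur <;>
      simp [PySem.Chars.split₀.go, List.isEmpty_iff, hcur]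
  | cons c rest ih =>
    intro cur acc
    have hc := h c (by simp)
    rw [PySem.Chars.split₀.go]
    simp only [hc, Bool.false_eq_true, if_false]
    rw [ih (fun d hd => h d (by simp [hd]))]
    simp

theorem pv_split0_single (cs : List Char) (hne : cs ≠ [])
    (h : ∀ c ∈ cs, PySem.Chars.isspace c = false) :
    PySem.Chars.split₀ cs = [cs] := by
  unfold PySem.Chars.split₀
  rw [pv_split0_go cs h]
  simp [List.isEmpty_iff, hne]

theorem pv_find_go (a b : List Char) (hb : ¬ (',' ∈ a)) :
    ∀ k : Nat, PySem.Chars.find.go [','] (a ++ ',' :: b) k = (k + a.length : Int) := by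
  induction a with
  | nil =>
    intro k
    rw [PySem.Chars.find.go.eq_def]
    simp [List.isPrefixOf]
  | cons c a' ih =>
    intro k
    rw [PySem.Chars.find.go.eq_def]
    have hc : c ≠ ',' := fun h => hb (by simp [h])
    have hpre : [','].isPrefixOf (c :: (a' ++ ',' :: b)) = false := by
      simp [List.isPrefixOf]
      intro h; exact absurd h.symm hc
    simp only [List.cons_append, hpre, Bool.false_eq_true, if_false]
    rw [ih (fun h => hb (by simp [h]))]
    simp only [List.length_cons]; push_cast; ring

theorem pv_find_comma (a b : List Char) (ha : ¬ (',' ∈ a)) :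
    PySem.Chars.find (a ++ ',' :: b) [','] = (a.length : Int) := by
  unfold PySem.Chars.find
  rw [pv_find_go a b ha 0]
  simp

-- the three parse components of a canonical string
theorem pv_canon_split₀ (x y : Int) :
    PySem.Str.split₀ (pvCanon x y) = [pvCanon x y] := by
  unfold PySem.Str.split₀
  rw [pv_split0_single]
  · simp [String.ofList_toList]
  · rw [pv_canon_toList]
    simp
  · rw [pv_canon_toList]
    intro c hc
    rcases List.mem_append.1 hc with h | h
    · exact pv_isspace_false (pv_toChars_mem x c h)
    · rcases List.mem_cons.1 h with rfl | h
      · decide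
      · exact pv_isspace_false (pv_toChars_mem y c h)

theorem pv_canon_find (x y : Int) :
    PySem.Str.find (pvCanon x y) "," = ((PySem.Int.toChars x).length : Int) := by
  unfold PySem.Str.find
  rw [pv_canon_toList]
  have : (",").toList = [','] := rfl
  rw [this, pv_find_comma _ _ (pv_comma_not_mem x)]

theorem pv_canon_slice_left (x y : Int) :
    PySem.Str.slice (pvCanon x y) none (some ((PySem.Int.toChars x).length : Int)) =
      PySem.Int.toStr x := by
  unfold PySem.Str.slice
  rw [pv_canon_toList]
  unfold PySem.Chars.slice
  rw [PySem.List.slice_to_natCast]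
  rw [List.take_left]
  rfl

theorem pv_canon_slice_right (x y : Int) :
    PySem.Str.slice (pvCanon x y) (some (((PySem.Int.toChars x).length : Int) + 1)) none =
      PySem.Int.toStr y := by
  unfold PySem.Str.slice
  rw [pv_canon_toList]
  have h1 : (((PySem.Int.toChars x).length : Int) + 1) = (((PySem.Int.toChars x).length + 1 : Nat) : Int) := by push_cast; ring
  rw [h1]
  unfold PySem.Chars.slice
  rw [PySem.List.slice_from_natCast]
  have h2 : PySem.Int.toChars x ++ ',' :: PySem.Int.toChars y
      = (PySem.Int.toChars x ++ [',']) ++ PySem.Int.toChars y := by simp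
  rw [h2]
  have h3 : (PySem.Int.toChars x ++ [',']).length = (PySem.Int.toChars x).length + 1 := by simp
  rw [← h3, List.drop_left]
  rfl

theorem pv_parse_canon {x y : Int} (hx : pvRT x = true) (hy : pvRT y = true) :
    pvParse (pvCanon x y) = some (x, y) := by
  have hx' : PySem.Int.ofStr? (PySem.Int.toStr x) = some x := by
    simpa [pvRT] using hx
  have hy' : PySem.Int.ofStr? (PySem.Int.toStr y) = some y := by
    simpa [pvRT] using hy
  unfold pvParse
  rw [pv_canon_split₀]
  simp only [List.head?_cons]
  rw [pv_canon_find]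
  have hj : ¬ (((PySem.Int.toChars x).length : Int) < 0) := by omega
  simp only [hj, if_false]
  rw [pv_canon_slice_left, pv_canon_slice_right, hx', hy']
theorem pv_len_slice (tok : String) (j : Int) (h0 : 0 ≤ j) (h1 : j ≤ PySem.Str.len tok) :
    PySem.Str.len (PySem.Str.slice tok none (some j)) = j := by
  unfold PySem.Str.len PySem.Str.slice PySem.Chars.slice at *
  rw [String.toList_ofList, PySem.List.slice_to (b := j) tok.toList h0]
  simp only [List.length_take]
  omega

theorem pv_pointB_of_parse {s : String} {x y : Int} (h : pvParse s = some (x, y)) :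
    pvPointB s = (x, y) := by
  unfold pvParse at h
  unfold pvPointB
  rcases hs : (PySem.Str.split₀ s).head? with _ | tok
  · rw [hs] at h; simp at h
  · rw [hs] at h
    simp only at h
    have htok : (PySem.List.pyGet? (PySem.Str.split₀ s) 0).getD "" = tok := by
      rw [PySem.List.pyGet?_zero]
      rw [← List.head?_eq_getElem?, hs]
      rfl
    rw [htok]
    split at h
    · simp at h
    · split at h
      · simp only [Option.some.injEq, Prod.mk.injEq] at h
        simp_all
      · simp at h
theorem pv_stepA_of_parse {s : String} {x y : Int} (e1 e2 : Bool)
    (h : pvParse s = some (x, y)) :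
    pvStepA e1 e2 s = pvCanon (x + pvDx e1) (y + pvDx e2) := by
  unfold pvParse at h
  simp only [pvStepA]
  rcases hs : (PySem.Str.split₀ s).head? with _ | tok
  · rw [hs] at h; simp at h
  · rw [hs] at h
    simp only at h
    have htok : (PySem.List.pyGet? (PySem.Str.split₀ s) 0).getD "" = tok := by
      rw [PySem.List.pyGet?_zero]
      rw [← List.head?_eq_getElem?, hs]
      rfl
    rw [htok]
    split at h
    · simp at h
    · rename_i hj
      rw [not_lt] at hj
      have hle : PySem.Str.find tok "," ≤ PySem.Str.len tok := by
        unfold PySem.Str.find PySem.Str.len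
        exact PySem.Chars.find_le_length _ _
      rw [pv_len_slice tok _ hj hle]
      split at h
      · rename_i x' y' hx' hy'
        simp only [Option.some.injEq, Prod.mk.injEq] at h
        rw [hx', hy']
        simp only [Option.getD_some]
        rw [h.1, h.2]
        rfl
      · simp at h
def pvPfx (num : String) (f : Nat → String) : Nat → List String
  | 0 => [num]
  | j + 1 => pvPfx num f j ++ [f j]

theorem pvPfx_length (num : String) (f : Nat → String) (j : Nat) :
    (pvPfx num f j).length = j + 1 := by
  induction j with
  | zero => rfl
  | succ k ih => simp [pvPfx, ih]

theorem pvPfx_last (num : String) (f : Nat → String) (j : Nat) :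
    (PySem.List.pyGet? (pvPfx num f j) (-1)).getD ""
      = if j = 0 then num else f (j - 1) := by
  cases j with
  | zero => rfl
  | succ k =>
    simp only [pvPfx, PySem.List.pyGet?_neg_one_append_singleton]
    rfl

theorem pvPfx_get_self (num : String) (f : Nat → String) (j : Nat) :
    (PySem.List.pyGet? (pvPfx num f j) (j : Int)).getD ""
      = if j = 0 then num else f (j - 1) := by
  cases j with
  | zero => rfl
  | succ k =>
    simp only [pvPfx]
    have hl : ((k : Int) + 1) = ((pvPfx num f k).length : Int) := by
      rw [pvPfx_length]; push_cast; ring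
    have : (PySem.List.pyGet? (pvPfx num f k ++ [f k] : List String) ((k + 1 : Nat) : Int))
        = some (f k) := by
      push_cast
      rw [hl]
      have := PySem.List.pyGet?_append_length (pre := pvPfx num f k) (y := f k) (ys := ([] : List String))
      simpa using this
    simp only [this]
    rfl

theorem pvPfx_eq_cons_map (num : String) (f : Nat → String) (j : Nat) :
    pvPfx num f j = num :: (List.range j).map f := by
  induction j with
  | zero => rfl
  | succ k ih => simp [pvPfx, ih, List.range_succ]
theorem pv_canon_inj {x y x' y' : Int} (hx : pvRT x = true) (hy : pvRT y = true)
    (hx' : pvRT x' = true) (hy' : pvRT y' = true)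
    (h : pvCanon x y = pvCanon x' y') : x = x' ∧ y = y' := by
  have h1 := pv_parse_canon hx hy
  have h2 := pv_parse_canon hx' hy'
  rw [h, h2] at h1
  simp at h1
  exact ⟨h1.1.symm, h1.2.symm⟩

theorem pv_dx_mul_cancel (b : Bool) {u v : Int} (h : pvDx b * u = pvDx b * v) : u = v := by
  cases b <;> simp [pvDx] at h <;> omega

theorem pv_loop_inv (num num_2 : String) (e1 e2 : Bool) (x0 y0 : Int) (N : Nat)
    (hN : 1 ≤ N)
    (hp0 : pvParse num = some (x0, y0))
    (hRT : ∀ k : Nat, k ≤ N →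
      pvRT (x0 + pvDx e1 * k) = true ∧ pvRT (y0 + pvDx e2 * k) = true)
    (hnum2 : num_2 = pvCanon (x0 + pvDx e1 * N) (y0 + pvDx e2 * N))
    (hne : num ≠ num_2) :
    ∀ d j, j + d = N →
      pvLoopA num_2 e1 e2
        (pvPfx num (fun k => pvCanon (x0 + pvDx e1 * (k + 1)) (y0 + pvDx e2 * (k + 1))) j)
        j (d + 1)
      = pvPfx num (fun k => pvCanon (x0 + pvDx e1 * (k + 1)) (y0 + pvDx e2 * (k + 1))) N := by
  intro d
  induction d with
  | zero =>
    intro j hj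
    have hjN : j = N := by omega
    subst hjN
    rw [pvLoopA]
    rw [pvPfx_last]
    have hN0 : ¬ (j = 0) := by omega
    simp only [hN0, if_false]
    have : pvCanon (x0 + pvDx e1 * ((j - 1 : Nat) + 1)) (y0 + pvDx e2 * ((j - 1 : Nat) + 1))
        = num_2 := by
      rw [hnum2]
      congr 2 <;> · congr 1; omega
    rw [this]
    simp
  | succ d ih =>
    intro j hj
    have hjN : j < N := by omega
    -- the last element of the prefix
    have hlast : (PySem.List.pyGet? (pvPfx num
        (fun k => pvCanon (x0 + pvDx e1 * (k + 1)) (y0 + pvDx e2 * (k + 1))) j) (-1)).getD ""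
        = if j = 0 then num else pvCanon (x0 + pvDx e1 * j) (y0 + pvDx e2 * j) := by
      rw [pvPfx_last]
      cases j with
      | zero => simp
      | succ k =>
        simp only [Nat.succ_ne_zero, if_false]
        congr 2
    have hcur : (PySem.List.pyGet? (pvPfx num
        (fun k => pvCanon (x0 + pvDx e1 * (k + 1)) (y0 + pvDx e2 * (k + 1))) j) (j : Int)).getD ""
        = if j = 0 then num else pvCanon (x0 + pvDx e1 * j) (y0 + pvDx e2 * j) := by
      rw [pvPfx_get_self]
      cases j with
      | zero => simp
      | succ k =>
        simp only [Nat.succ_ne_zero, if_false]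
        congr 2
    -- the parse of the last element
    have hparse : pvParse ((PySem.List.pyGet? (pvPfx num
        (fun k => pvCanon (x0 + pvDx e1 * (k + 1)) (y0 + pvDx e2 * (k + 1))) j) (j : Int)).getD "")
        = some (x0 + pvDx e1 * j, y0 + pvDx e2 * j) := by
      rw [hcur]
      cases j with
      | zero => simpa using hp0
      | succ k =>
        simp only [Nat.succ_ne_zero, if_false]
        exact pv_parse_canon (hRT (k+1) (by omega)).1 (hRT (k+1) (by omega)).2
    -- the loop does not stop early
    have hne' : (PySem.List.pyGet? (pvPfx num
        (fun k => pvCanon (x0 + pvDx e1 * (k + 1)) (y0 + pvDx e2 * (k + 1))) j) (-1)).getD ""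
        ≠ num_2 := by
      rw [hlast]
      cases j with
      | zero => simpa using hne
      | succ k =>
        simp only [Nat.succ_ne_zero, if_false]
        intro hcontra
        rw [hnum2] at hcontra
        have := pv_canon_inj (hRT (k+1) (by omega)).1 (hRT (k+1) (by omega)).2
          (hRT N (le_refl N)).1 (hRT N (le_refl N)).2 hcontra
        have hx := this.1
        have hkN : (((k + 1 : Nat)) : Int) = (N : Int) := pv_dx_mul_cancel e1 (by omega)
        omega
    rw [pvLoopA]
    simp only [hne', ne_eq, not_false_iff, if_true]
    rw [pv_stepA_of_parse e1 e2 hparse]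
    have hstep : pvCanon (x0 + pvDx e1 * j + pvDx e1) (y0 + pvDx e2 * j + pvDx e2)
        = pvCanon (x0 + pvDx e1 * ((j : Int) + 1)) (y0 + pvDx e2 * ((j : Int) + 1)) := by
      have h1 : x0 + pvDx e1 * (j : Int) + pvDx e1 = x0 + pvDx e1 * ((j : Int) + 1) := by ring
      have h2 : y0 + pvDx e2 * (j : Int) + pvDx e2 = y0 + pvDx e2 * ((j : Int) + 1) := by ring
      rw [h1, h2]
    rw [hstep]
    have hpfx : pvPfx num (fun k => pvCanon (x0 + pvDx e1 * (k + 1)) (y0 + pvDx e2 * (k + 1))) j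
        ++ [pvCanon (x0 + pvDx e1 * ((j : Int) + 1)) (y0 + pvDx e2 * ((j : Int) + 1))]
        = pvPfx num (fun k => pvCanon (x0 + pvDx e1 * (k + 1)) (y0 + pvDx e2 * (k + 1))) (j + 1) := by
      simp [pvPfx]
    rw [hpfx]
    exact ih (j + 1) (by omega)


theorem pv_witness_ok :
    Dom_procedure_3 pvWitness_procedure_3.1 pvWitness_procedure_3.2.1
      pvWitness_procedure_3.2.2.1 pvWitness_procedure_3.2.2.2 ∧
    Pre_procedure_3 pvWitness_procedure_3.1 pvWitness_procedure_3.2.1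
      pvWitness_procedure_3.2.2.1 pvWitness_procedure_3.2.2.2 := by
  constructor <;> decide

theorem pv_main (num num_2 : String) (e1 e2 : Bool)
    (hpre : Pre_procedure_3 num num_2 e1 e2) :
    procedure_3 num num_2 e1 e2 = procedure_3_alt num num_2 e1 e2 := by
  rcases hpre with heq | hchain
  · -- num already equals num_2: the loop body never runs
    subst heq
    simp only [procedure_3, procedure_3_alt, if_pos]
    obtain ⟨m, hm⟩ : ∃ m, pvFuelA num num = m + 1 := by
      unfold pvFuelA
      split
      · exact ⟨_, rfl⟩
      · exact ⟨0, rfl⟩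
    rw [hm, pvLoopA]
    simp [PySem.List.pyGet?_neg_one]
  · -- a proper chain of n ≥ 1 steps
    unfold pvChainOk at hchain
    rcases hp0 : pvParse num with _ | p0
    · rw [hp0] at hchain; simp at hchain
    rcases hp1 : pvParse num_2 with _ | p1
    · rw [hp0, hp1] at hchain; simp at hchain
    obtain ⟨x0, y0⟩ := p0
    obtain ⟨x1, y1⟩ := p1
    rw [hp0, hp1] at hchain
    simp only [Bool.and_eq_true, decide_eq_true_eq, List.all_eq_true, List.mem_range] at hchain
    obtain ⟨⟨⟨hcanon, hspan⟩, hn⟩, hall⟩ := hchain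
    set n : Int := pvDx e1 * (x1 - x0) with hndef
    set N : Nat := n.toNat with hNdef
    have hNn : (N : Int) = n := by omega
    have hdx : ∀ b : Bool, pvDx b * pvDx b = 1 := by intro b; cases b <;> rfl
    have hx1 : x1 = x0 + pvDx e1 * (N : Int) := by
      have : pvDx e1 * n = x1 - x0 := by
        rw [hndef, ← mul_assoc, hdx e1, one_mul]
      rw [hNn]; omega
    have hy1 : y1 = y0 + pvDx e2 * (N : Int) := by
      have : pvDx e2 * n = y1 - y0 := by
        rw [← hspan, ← mul_assoc, hdx e2, one_mul]
      rw [hNn]; omega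
    have hRT' : ∀ k : Nat, k ≤ N →
        pvRT (x0 + pvDx e1 * k) = true ∧ pvRT (y0 + pvDx e2 * k) = true := by
      intro k hk
      exact hall k (by omega)
    have hN1 : 1 ≤ N := by omega
    have hne : num ≠ num_2 := by
      intro h
      rw [h, hp1] at hp0
      simp at hp0
      have : x1 = x0 := hp0.1
      rw [hndef] at hn
      rw [this] at hn
      simp at hn
    have hnum2 : num_2 = pvCanon (x0 + pvDx e1 * (N : Int)) (y0 + pvDx e2 * (N : Int)) := by
      rw [hcanon, hx1, hy1]
    -- the A side
    have hfuel : pvFuelA num num_2 = N + 1 := by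
      unfold pvFuelA
      rw [hp0, hp1]
      have : (x1 - x0).natAbs = N := by
        have hx : x1 - x0 = pvDx e1 * (N : Int) := by rw [hx1]; ring
        cases e1 <;> simp [pvDx] at hx <;> omega
      show (x1 - x0).natAbs + 1 = N + 1
      rw [this]
    have hA : procedure_3 num num_2 e1 e2
        = pvPfx num (fun k => pvCanon (x0 + pvDx e1 * (k + 1)) (y0 + pvDx e2 * (k + 1))) N := by
      unfold procedure_3
      rw [hfuel]
      have h0 : ([num] : List String)
          = pvPfx num (fun k => pvCanon (x0 + pvDx e1 * (k + 1)) (y0 + pvDx e2 * (k + 1))) 0 := rfl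
      rw [h0]
      exact pv_loop_inv num num_2 e1 e2 x0 y0 N hN1 hp0 hRT' hnum2 hne N 0 (by omega)
    -- the B side
    have hB : procedure_3_alt num num_2 e1 e2
        = pvPfx num (fun k => pvCanon (x0 + pvDx e1 * (k + 1)) (y0 + pvDx e2 * (k + 1))) N := by
      simp only [procedure_3_alt, if_neg hne]
      rw [pv_pointB_of_parse hp0, pv_pointB_of_parse hp1]
      simp only
      have hpv : ∀ b : Bool, (if b = true then (1 : Int) else -1) = pvDx b := fun b => rfl
      simp only [hpv]
      rw [pvPfx_eq_cons_map]
      have htn : (pvDx e1 * (x1 - x0) + 1 - 1).toNat = N := by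
        rw [← hndef]; omega
      have hrange : PySem.List.pyRange 1 (pvDx e1 * (x1 - x0) + 1) 1
          = (List.range N).map (fun k : Nat => (1 : Int) + (k : Int)) := by
        rw [PySem.List.pyRange_one, htn]
      rw [hrange, List.map_map]
      simp only [List.cons_append, List.nil_append]
      congr 1
      apply List.map_congr_left
      intro k _
      simp only [Function.comp]
      unfold pvCanon
      congr 2
      · congr 1; ring
      · congr 2; ring
    rw [hA, hB]

-- ===== VERDICT (by name: the statement is the Claim_ definition above) =====
theorem procedure_3_spec : Claim_equal_procedure_3 := by
  intro num num_2 e1 e2 _hdom hpre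
  unfold Spec_procedure_3
  exact pv_main num num_2 e1 e2 hpre
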